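-- pv_equiv track=rewrite | github.com/conradry/prtm | proteome/models/design/proteinsolver/utils/core/pdb_parser.py | _nice_case
-- ===== SOURCE A (Python) =====
-- def _nice_case(line):
--     """Makes A Lowercase String With Capitals."""
--     line = line.lower()
--     s = ""
--     i = 0
--     nextCap = 1
--     while i < len(line):
--         c = line[i]
--         if c >= "a" and c <= "z" and nextCap:
--             c = c.upper()
--             nextCap = 0
--         elif (
--             c == " "
--             or c == "."
--             or c == ","
--             or c == ";"
--             or c == ":"
--             or c == "\t"
--             or c == "-"
--             or c == "_"
--         ):
--             nextCap = 1
--         s += c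
--         i += 1
--     return s
-- ===== SOURCE B (Python) =====
-- def _cap_first(seg):
--     """Upper-case the first ASCII a..z character of the segment, if any."""
--     for j, ch in enumerate(seg):
--         if "a" <= ch <= "z":
--             seg[j] = ch.upper()
--             break
--     return seg
--
--
-- def _nice_case(line):
--     """Makes A Lowercase String With Capitals."""
--     seps = " .,;:\t-_"
--     out = []
--     seg = []
--     for c in line.lower():
--         if c in seps:
--             out += _cap_first(seg)
--             out.append(c)
--             seg = []
--         else:
--             seg.append(c)
--     out += _cap_first(seg)
--     return "".join(out)
-- ===== Notes on version B (the rewrite author's own statement) =====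
-- stated objective: faster
-- what changed: Replaces the carried nextCap-flag character loop with quadratic string concatenation by a tokenize-map-join structure: split on separators keeping them, upper-case only the first a..z of each segment, join once.
import Mathlib
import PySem

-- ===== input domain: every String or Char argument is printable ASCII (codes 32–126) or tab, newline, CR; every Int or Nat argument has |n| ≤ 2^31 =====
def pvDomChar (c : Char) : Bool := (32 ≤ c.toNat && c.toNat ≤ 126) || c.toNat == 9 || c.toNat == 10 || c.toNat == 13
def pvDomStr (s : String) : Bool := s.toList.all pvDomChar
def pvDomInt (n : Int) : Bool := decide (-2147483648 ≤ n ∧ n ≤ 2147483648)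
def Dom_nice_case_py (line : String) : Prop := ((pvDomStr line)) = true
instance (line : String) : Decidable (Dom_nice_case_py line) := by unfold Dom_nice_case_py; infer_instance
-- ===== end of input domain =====

-- B replaces A's carried nextCap-flag single pass by tokenize (split keeping separators) /
-- map (upper-case first a..z of each segment) / join; same values, alternative structure.

-- ===== PORT A =====
-- the separator test of A's elif chain
def pvSepA (c : Char) : Bool :=
  c == ' ' || c == '.' || c == ',' || c == ';' || c == ':' || c == '\t' || c == '-' || c == '_'

-- A's while loop over the lowered characters, state = nextCap; s += c becomes the cons
def niceLoopA : List Char → Bool → List Char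
  | [], _ => []
  | c :: rest, cap =>
    if ('a' ≤ c ∧ c ≤ 'z') ∧ cap = true then PySem.Chars.upperChar c :: niceLoopA rest false
    else if pvSepA c then c :: niceLoopA rest true
    else c :: niceLoopA rest cap

def nice_case_py (line : String) : String :=
  String.ofList (niceLoopA (PySem.Str.lower line).toList true)

-- ===== PORT B =====
-- Source B's _cap_first: upper-case the first a..z of the segment
def capFirstB : List Char → List Char
  | [] => []
  | c :: rest =>
    if 'a' ≤ c ∧ c ≤ 'z' then PySem.Chars.upperChar c :: rest else c :: capFirstB rest

-- Source B's main loop: accumulate the current segment, flush it (capitalised) at each separator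
def segLoopB : List Char → List Char → List Char
  | [], seg => capFirstB seg
  | c :: rest, seg =>
    if pvSepA c then capFirstB seg ++ c :: segLoopB rest []
    else segLoopB rest (seg ++ [c])

def nice_case_py_alt (line : String) : String :=
  String.ofList (segLoopB (PySem.Str.lower line).toList [])

-- ===== PRECONDITION & SPEC =====
def Spec_nice_case_py (line : String) (out : String) : Prop := out = nice_case_py_alt line
instance (line : String) (out : String) : Decidable (Spec_nice_case_py line out) := by unfold Spec_nice_case_py; infer_instance

-- ===== CLAIM (what is proved, stated in full; the proofs are below) =====
def Claim_equal_nice_case_py : Prop := ∀ (line : String), Dom_nice_case_py line → Spec_nice_case_py line (nice_case_py line)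

-- ===== LEMMAS AND PROOFS =====

theorem sepA_not_az {c : Char} (h : pvSepA c = true) : ¬ ('a' ≤ c ∧ c ≤ 'z') := by
  simp only [pvSepA, Bool.or_eq_true, beq_iff_eq] at h
  rcases h with ((((((h|h)|h)|h)|h)|h)|h)|h <;> subst h <;> decide

theorem capFirst_nolower {seg : List Char} (h : ∀ c ∈ seg, ¬ ('a' ≤ c ∧ c ≤ 'z')) :
    capFirstB seg = seg := by
  induction seg with
  | nil => rfl
  | cons c rest ih =>
    simp only [capFirstB]
    rw [if_neg (h c (by simp)), ih (fun d hd => h d (by simp [hd]))]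

theorem capFirst_append_lower {seg : List Char} {c : Char}
    (h : ∀ d ∈ seg, ¬ ('a' ≤ d ∧ d ≤ 'z')) (hc : 'a' ≤ c ∧ c ≤ 'z') :
    capFirstB (seg ++ [c]) = seg ++ [PySem.Chars.upperChar c] := by
  induction seg with
  | nil => simp [capFirstB, hc]
  | cons d rest ih =>
    simp only [List.cons_append, capFirstB]
    rw [if_neg (h d (by simp)), ih (fun e he => h e (by simp [he]))]

theorem capFirst_append_of_has {seg : List Char} {c : Char}
    (h : ∃ d ∈ seg, 'a' ≤ d ∧ d ≤ 'z') :
    capFirstB (seg ++ [c]) = capFirstB seg ++ [c] := by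
  induction seg with
  | nil => simp at h
  | cons d rest ih =>
    simp only [List.cons_append, capFirstB]
    by_cases hd : 'a' ≤ d ∧ d ≤ 'z'
    · rw [if_pos hd, if_pos hd]; rfl
    · rw [if_neg hd, if_neg hd]
      have : ∃ e ∈ rest, 'a' ≤ e ∧ e ≤ 'z' := by
        rcases h with ⟨e, he, hel⟩
        rcases List.mem_cons.mp he with rfl | he'
        · exact absurd hel hd
        · exact ⟨e, he', hel⟩
      simp [ih this]

theorem niceA_cap_lower {c : Char} {rest : List Char} (hl : 'a' ≤ c ∧ c ≤ 'z') :
    niceLoopA (c :: rest) true = PySem.Chars.upperChar c :: niceLoopA rest false := by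
  simp [niceLoopA, hl]

theorem niceA_sep {c : Char} {rest : List Char} (hs : pvSepA c = true) (cap : Bool) :
    niceLoopA (c :: rest) cap = c :: niceLoopA rest true := by
  cases cap <;> simp [niceLoopA, hs, sepA_not_az hs]

theorem niceA_other {c : Char} {rest : List Char} (hs : ¬ pvSepA c = true)
    (hl : ¬ ('a' ≤ c ∧ c ≤ 'z')) (cap : Bool) :
    niceLoopA (c :: rest) cap = c :: niceLoopA rest cap := by
  cases cap <;> simp [niceLoopA, hs, hl]

theorem niceA_false_nonsep {c : Char} {rest : List Char} (hs : ¬ pvSepA c = true) :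
    niceLoopA (c :: rest) false = c :: niceLoopA rest false := by
  simp [niceLoopA, hs]

theorem segB_sep {c : Char} {rest seg : List Char} (hs : pvSepA c = true) :
    segLoopB (c :: rest) seg = capFirstB seg ++ c :: segLoopB rest [] := by
  simp [segLoopB, hs]

theorem segB_other {c : Char} {rest seg : List Char} (hs : ¬ pvSepA c = true) :
    segLoopB (c :: rest) seg = segLoopB rest (seg ++ [c]) := by
  simp [segLoopB, hs]

theorem keyAB (cs : List Char) :
    (∀ seg, (∀ c ∈ seg, ¬ ('a' ≤ c ∧ c ≤ 'z')) →
        segLoopB cs seg = seg ++ niceLoopA cs true) ∧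
    (∀ seg, (∃ c ∈ seg, 'a' ≤ c ∧ c ≤ 'z') →
        segLoopB cs seg = capFirstB seg ++ niceLoopA cs false) := by
  induction cs with
  | nil =>
    refine ⟨fun seg h => ?_, fun seg _ => ?_⟩
    · simp [segLoopB, niceLoopA, capFirst_nolower h]
    · simp [segLoopB, niceLoopA]
  | cons c rest ih =>
    refine ⟨fun seg h => ?_, fun seg h => ?_⟩
    · by_cases hs : pvSepA c = true
      · rw [segB_sep hs, niceA_sep hs, capFirst_nolower h, ih.1 [] (by simp)]
        simp
      · by_cases hl : 'a' ≤ c ∧ c ≤ 'z'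
        · rw [segB_other hs, niceA_cap_lower hl,
            ih.2 (seg ++ [c]) ⟨c, by simp, hl⟩, capFirst_append_lower h hl]
          simp
        · rw [segB_other hs, niceA_other hs hl,
            ih.1 (seg ++ [c]) (by
              intro d hd
              rcases List.mem_append.mp hd with hd' | hd'
              · exact h d hd'
              · simp at hd'; subst hd'; exact hl)]
          simp
    · by_cases hs : pvSepA c = true
      · rw [segB_sep hs, niceA_sep hs, ih.1 [] (by simp)]
        simp
      · rw [segB_other hs, niceA_false_nonsep hs,
          ih.2 (seg ++ [c]) (by
            rcases h with ⟨d, hd, hdl⟩; exact ⟨d, by simp [hd], hdl⟩),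
          capFirst_append_of_has h]
        simp

-- ===== VERDICT (by name: the statement is the Claim_ definition above) =====
theorem nice_case_py_spec : Claim_equal_nice_case_py := by
  intro line _
  show nice_case_py line = nice_case_py_alt line
  unfold nice_case_py nice_case_py_alt
  rw [(keyAB (PySem.Str.lower line).toList).1 [] (by simp)]
  simp
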